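-- pv_equiv track=rewrite | github.com/gug2/Chains | chains.py | findNotDigits
-- ===== SOURCE A (Python) =====
-- def findNotDigits(row):
--     rowStr = ''
--     for element in row:
--         rowStr += str(element)
--
--     notDigits = []
--
--     # 0 - 9
--     for digit in range(1, 10):
--         if str(digit) not in rowStr:
--             notDigits.append(digit)
--
--     return notDigits
-- ===== SOURCE B (Python) =====
-- def findNotDigits(row):
--     seen = [False] * 10
--     for element in row:
--         n = abs(element)
--         while True:
--             seen[n % 10] = True
--             n //= 10
--             if n == 0:
--                 break
--     return [d for d in range(1, 10) if not seen[d]]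
-- ===== Notes on version B (the rewrite author's own statement) =====
-- stated objective: alternative
-- what changed: B never builds or scans strings: it extracts each element's decimal digits arithmetically (abs, %10, //10) into a 10-entry boolean table in one pass, then filters 1-9 by table lookup, instead of A's concatenated str() string scanned once per digit.
import Mathlib
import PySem

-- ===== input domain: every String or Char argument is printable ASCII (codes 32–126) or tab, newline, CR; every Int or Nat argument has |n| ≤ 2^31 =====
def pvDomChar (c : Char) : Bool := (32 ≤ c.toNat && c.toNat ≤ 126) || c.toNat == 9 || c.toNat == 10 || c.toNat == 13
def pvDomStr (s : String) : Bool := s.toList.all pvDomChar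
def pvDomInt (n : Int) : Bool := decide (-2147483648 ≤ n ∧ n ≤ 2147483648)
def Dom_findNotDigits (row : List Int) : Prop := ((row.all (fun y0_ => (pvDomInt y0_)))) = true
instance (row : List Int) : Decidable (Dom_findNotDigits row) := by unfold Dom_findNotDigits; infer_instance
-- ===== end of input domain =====

-- B avoids strings entirely: it extracts each element's decimal digits arithmetically
-- (abs, %10, //10) into a 10-entry boolean table, then filters 1-9 by table lookup
-- (objective: alternative).

-- ===== PORT A =====
def findNotDigits (row : List Int) : List Int :=
  let rowStr : List Char := row.foldl (fun acc e => acc ++ PySem.Int.toChars e) []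
  (PySem.List.pyRange 1 10 1).foldl
    (fun notDigits digit =>
      if PySem.Chars.isIn (PySem.Int.toChars digit) rowStr then notDigits
      else notDigits ++ [digit]) []

-- ===== PORT B =====
-- Python's inner do-while: mark seen[n % 10], n //= 10, stop when n = 0 (n = |element| ≥ 0,
-- so Nat % and / are exactly Python's % and //).
def markDigits (n : Nat) (seen : List Bool) : List Bool :=
  let seen := seen.set (n % 10) true
  if _h : n / 10 = 0 then seen else markDigits (n / 10) seen
termination_by n
decreasing_by omega

def findNotDigits_alt (row : List Int) : List Int :=
  let seen : List Bool := row.foldl (fun s e => markDigits e.natAbs s) (List.replicate 10 false)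
  (PySem.List.pyRange 1 10 1).filter (fun d => !(seen.getD d.toNat false))

-- ===== PRECONDITION & SPEC =====
def Spec_findNotDigits (row : List Int) (out : List Int) : Prop := out = findNotDigits_alt row
instance (row : List Int) (out : List Int) : Decidable (Spec_findNotDigits row out) := by unfold Spec_findNotDigits; infer_instance

-- ===== CLAIM (what is proved, stated in full; the proofs are below) =====
def Claim_equal_findNotDigits : Prop := ∀ (row : List Int), Dom_findNotDigits row → Spec_findNotDigits row (findNotDigits row)

-- ===== LEMMAS AND PROOFS =====

-- the list of decimal digits B's do-while visits (least significant first; [⋯0] for 0)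
def natDigits (n : Nat) : List Nat :=
  (n % 10) :: (if _h : n / 10 = 0 then [] else natDigits (n / 10))
termination_by n
decreasing_by omega

theorem natDigits_lt (n : Nat) : ∀ d ∈ natDigits n, d < 10 := by
  induction n using Nat.strong_induction_on with
  | _ n ih =>
    intro d hd
    rw [natDigits] at hd
    rcases List.mem_cons.mp hd with h1 | h2
    · omega
    · by_cases h0 : n / 10 = 0
      · rw [dif_pos h0] at h2; simp at h2
      · rw [dif_neg h0] at h2
        exact ih (n / 10) (by omega) d h2

-- core of Nat.toDigits: the chars of n are exactly natDigits n, reversed and rendered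
theorem toDigitsCore_eq (fuel : Nat) : ∀ (n : Nat) (acc : List Char), n < fuel →
    Nat.toDigitsCore 10 fuel n acc = ((natDigits n).map Nat.digitChar).reverse ++ acc := by
  induction fuel with
  | zero => intro n acc h; omega
  | succ fuel ih =>
    intro n acc h
    rw [natDigits]
    by_cases h0 : n / 10 = 0
    · simp only [Nat.toDigitsCore, h0, if_pos, dif_pos]
      simp
    · simp only [Nat.toDigitsCore, h0, if_neg, dif_neg, not_false_iff]
      rw [ih (n / 10) _ (by omega)]
      simp

theorem toChars_eq (e : Int) :
    PySem.Int.toChars e =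
      (if e < 0 then ['-'] else []) ++ ((natDigits e.natAbs).map Nat.digitChar).reverse := by
  unfold PySem.Int.toChars Nat.toDigits
  by_cases h : e < 0
  · rw [if_pos h, if_pos h, toDigitsCore_eq _ _ _ (Nat.lt_succ_self _)]; simp
  · have ht : e.toNat = e.natAbs := by omega
    rw [if_neg h, if_neg h, toDigitsCore_eq _ _ _ (Nat.lt_succ_self _), ht]; simp

theorem digitChar_inj (k d : Nat) (hk : k < 10) (hd : d < 10)
    (h : Nat.digitChar k = Nat.digitChar d) : k = d := by
  revert h; interval_cases k <;> interval_cases d <;> decide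

theorem digitChar_ne_dash (d : Nat) (hd : d < 10) : Nat.digitChar d ≠ '-' := by
  interval_cases d <;> decide

-- digit char d occurs in str(e) iff d is a decimal digit of |e|
theorem mem_toChars_iff (e : Int) (d : Nat) (hd : d < 10) :
    (Nat.digitChar d ∈ PySem.Int.toChars e ↔ d ∈ natDigits e.natAbs) := by
  rw [toChars_eq]
  simp only [List.mem_append, List.mem_reverse, List.mem_map]
  constructor
  · rintro (hneg | ⟨k, hk, hkd⟩)
    · exfalso
      by_cases h : e < 0
      · rw [if_pos h] at hneg; simp at hneg
        exact digitChar_ne_dash d hd hneg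
      · rw [if_neg h] at hneg; simp at hneg
    · rwa [digitChar_inj k d (natDigits_lt _ k hk) hd hkd] at hk
  · intro h; exact Or.inr ⟨d, h, rfl⟩

-- B's table: the digit set a foldl of set-true writes
theorem length_foldl_set (ds : List Nat) (seen : List Bool) :
    (ds.foldl (fun s d => s.set d true) seen).length = seen.length := by
  induction ds generalizing seen with
  | nil => rfl
  | cons d t ih => rw [List.foldl_cons, ih, List.length_set]

theorem getD_foldl_set (ds : List Nat) (seen : List Bool) (i : Nat)
    (hi : i < seen.length) :
    (ds.foldl (fun s d => s.set d true) seen).getD i false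
      = (decide (i ∈ ds) || seen.getD i false) := by
  induction ds generalizing seen with
  | nil => simp
  | cons d t ih =>
    rw [List.foldl_cons, ih _ (by rw [List.length_set]; exact hi)]
    have hset : (seen.set d true).getD i false
        = (decide (d = i) || seen.getD i false) := by
      rw [List.getD_eq_getElem?_getD, List.getD_eq_getElem?_getD, List.getElem?_set]
      by_cases hdi : d = i
      · subst hdi; simp [hi]
      · simp [hdi]
    rw [hset]
    by_cases h1 : i ∈ t <;> by_cases h2 : d = i
    · simp [h1, h2]
    · simp [h1, h2]
    · simp [h1, h2]
    · have h2' : i ≠ d := fun h => h2 h.symm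
      simp [h1, h2, h2']

theorem markDigits_eq (n : Nat) : ∀ seen : List Bool,
    markDigits n seen = (natDigits n).foldl (fun s d => s.set d true) seen := by
  induction n using Nat.strong_induction_on with
  | _ n ih =>
    intro seen
    rw [markDigits, natDigits]
    by_cases h0 : n / 10 = 0
    · simp [h0]
    · simp only [h0, dif_neg, not_false_iff, List.foldl_cons]
      exact ih (n / 10) (by omega) _

theorem getD_foldl_mark (row : List Int) (seen : List Bool) (i : Nat)
    (hi : i < seen.length) :
    ((row.foldl (fun s e => markDigits e.natAbs s) seen).getD i false)
      = (decide (∃ e ∈ row, i ∈ natDigits e.natAbs) || seen.getD i false) := by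
  induction row generalizing seen with
  | nil => simp
  | cons x t ih =>
    rw [List.foldl_cons, markDigits_eq x.natAbs,
        ih _ (by rw [length_foldl_set]; exact hi), getD_foldl_set _ _ _ hi]
    by_cases h1 : i ∈ natDigits x.natAbs <;>
      by_cases h2 : ∃ e ∈ t, i ∈ natDigits e.natAbs <;> simp [h1, h2]

-- A's append-unless loop keeps exactly the elements failing the test, in order
theorem foldl_keep_unless (b : Int → Bool) (l : List Int) (acc : List Int) :
    l.foldl (fun nd x => if b x then nd else nd ++ [x]) acc
      = acc ++ l.filter (fun x => !(b x)) := by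
  have : (fun (nd : List Int) (x : Int) => if b x then nd else nd ++ [x])
      = (fun nd x => if !(b x) then nd ++ [id x] else nd) := by
    funext nd x; cases h : b x <;> simp_all
  rw [this, PySem.List.foldl_append_if, List.map_id]

theorem findNotDigits_spec_aux (row : List Int) :
    findNotDigits row = findNotDigits_alt row := by
  unfold findNotDigits findNotDigits_alt
  rw [foldl_keep_unless, PySem.List.foldl_append_eq_flatMap]
  simp only [List.nil_append]
  apply List.filter_congr
  intro d hd
  have hd9 : d = 1 ∨ d = 2 ∨ d = 3 ∨ d = 4 ∨ d = 5 ∨ d = 6 ∨ d = 7 ∨ d = 8 ∨ d = 9 := by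
    rw [show PySem.List.pyRange 1 10 1 = [1,2,3,4,5,6,7,8,9] from by decide] at hd
    simpa using hd
  have key : ∀ k : Nat, 1 ≤ k → k < 10 → PySem.Int.toChars (k : Int) = [Nat.digitChar k] → d = (k : Int) →
      (!PySem.Chars.isIn (PySem.Int.toChars d) (row.flatMap fun e => PySem.Int.toChars e))
        = (!((row.foldl (fun s e => markDigits e.natAbs s) (List.replicate 10 false)).getD d.toNat false)) := by
    intro k _hk1 hk10 hkc hdk
    subst hdk
    rw [hkc, Int.toNat_natCast]
    congr 1
    rw [getD_foldl_mark _ _ _ (by simp; omega)]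
    have hrep : (List.replicate 10 false).getD k false = false := by
      interval_cases k <;> rfl
    rw [hrep, Bool.or_false]
    rw [Bool.eq_iff_iff, PySem.Chars.isIn_iff_infix, List.singleton_infix_iff]
    simp only [List.mem_flatMap, decide_eq_true_eq]
    constructor
    · rintro ⟨e, he, hc⟩
      exact ⟨e, he, (mem_toChars_iff e k hk10).mp hc⟩
    · rintro ⟨e, he, hc⟩
      exact ⟨e, he, (mem_toChars_iff e k hk10).mpr hc⟩
  rcases hd9 with rfl|rfl|rfl|rfl|rfl|rfl|rfl|rfl|rfl <;>
    first
    | exact key 1 (by omega) (by omega) (by decide) rfl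
    | exact key 2 (by omega) (by omega) (by decide) rfl
    | exact key 3 (by omega) (by omega) (by decide) rfl
    | exact key 4 (by omega) (by omega) (by decide) rfl
    | exact key 5 (by omega) (by omega) (by decide) rfl
    | exact key 6 (by omega) (by omega) (by decide) rfl
    | exact key 7 (by omega) (by omega) (by decide) rfl
    | exact key 8 (by omega) (by omega) (by decide) rfl
    | exact key 9 (by omega) (by omega) (by decide) rfl

-- ===== VERDICT (by name: the statement is the Claim_ definition above) =====
theorem findNotDigits_spec : Claim_equal_findNotDigits := by
  intro row _
  unfold Spec_findNotDigits
  exact findNotDigits_spec_aux row
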